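-- pv_equiv track=rewrite | github.com/tiagokp97/hanoi_python | hanoiLinked.py | sort_arrays
-- ===== SOURCE A (Python) =====
-- def sort_arrays(array1, array2, array3, blocks):
--     new_array1 = []
--     new_array2 = []
--     new_array3 = []
--     for i in range(blocks):
--         if array1[i] is None:
--             new_array1.insert(0, array1[i])
--         else:
--             new_array1.append(array1[i])
--         if array2[i] is None:
--             new_array2.insert(0, array2[i])
--         else:
--             new_array2.append(array2[i])
--         if array3[i] is None:
--             new_array3.insert(0, array3[i])
--         else:
--             new_array3.append(array3[i])
--     return new_array1, new_array2, new_array3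
-- ===== SOURCE B (Python) =====
-- def sort_arrays(array1, array2, array3, blocks):
--     n = max(blocks, 0)
--     def part(arr):
--         kept = [x for x in arr[:n] if x is not None]
--         return [None] * (n - len(kept)) + kept
--     return part(array1), part(array2), part(array3)
-- ===== Notes on version B (the rewrite author's own statement) =====
-- stated objective: faster
-- what changed: Replaces the per-element insert(0)/append loop (insert(0) shifts the whole list each time) with a one-pass stable partition: filter the non-None prefix elements and prepend the matching count of Nones.
import Mathlib
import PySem

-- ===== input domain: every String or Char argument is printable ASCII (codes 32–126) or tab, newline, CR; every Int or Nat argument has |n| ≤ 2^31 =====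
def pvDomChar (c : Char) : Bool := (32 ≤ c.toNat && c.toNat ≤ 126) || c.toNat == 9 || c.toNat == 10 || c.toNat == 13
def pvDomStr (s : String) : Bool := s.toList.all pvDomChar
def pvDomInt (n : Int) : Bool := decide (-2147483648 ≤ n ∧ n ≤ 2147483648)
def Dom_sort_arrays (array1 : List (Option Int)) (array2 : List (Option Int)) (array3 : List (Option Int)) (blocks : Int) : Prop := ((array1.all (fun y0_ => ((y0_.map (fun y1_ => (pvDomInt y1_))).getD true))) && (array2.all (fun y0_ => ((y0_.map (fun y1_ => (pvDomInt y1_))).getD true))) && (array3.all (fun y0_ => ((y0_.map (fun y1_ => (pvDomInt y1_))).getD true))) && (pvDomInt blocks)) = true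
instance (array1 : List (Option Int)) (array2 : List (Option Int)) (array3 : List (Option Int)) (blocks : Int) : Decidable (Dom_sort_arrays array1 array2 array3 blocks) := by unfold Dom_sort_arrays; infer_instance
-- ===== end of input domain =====

-- B replaces A's quadratic insert(0)/append loop by a one-pass stable partition
-- (filter the non-None prefix, prepend the matching count of Nones); return values agree on Pre_.

-- ===== PORT A =====
-- one loop-body branch of A: 'if arr[i] is None: new.insert(0, arr[i]) else: new.append(arr[i])'
-- (pyGetD's default is never consulted under Pre_, which puts every index of range(blocks) in range)
def pvStepA (arr : List (Option Int)) (s : List (Option Int)) (i : Int) : List (Option Int) :=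
  let x := PySem.List.pyGetD arr i none
  if x = none then x :: s else s ++ [x]

def sort_arrays (array1 : List (Option Int)) (array2 : List (Option Int)) (array3 : List (Option Int)) (blocks : Int) : List (Option Int) × List (Option Int) × List (Option Int) :=
  (PySem.List.pyRange 0 blocks 1).foldl
    (fun (s : List (Option Int) × List (Option Int) × List (Option Int)) i =>
      (pvStepA array1 s.1 i, pvStepA array2 s.2.1 i, pvStepA array3 s.2.2 i))
    ([], [], [])

-- ===== PORT B =====
-- helper 'part' of Source B: kept = [x for x in arr[:n] if x is not None]; [None]*(n-len(kept)) + kept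
def pvPart (arr : List (Option Int)) (n : Nat) : List (Option Int) :=
  let kept := (arr.take n).filter (fun x => x ≠ none)
  List.replicate (n - kept.length) none ++ kept

def sort_arrays_alt (array1 : List (Option Int)) (array2 : List (Option Int)) (array3 : List (Option Int)) (blocks : Int) : List (Option Int) × List (Option Int) × List (Option Int) :=
  let n := blocks.toNat   -- n = max(blocks, 0)
  (pvPart array1 n, pvPart array2 n, pvPart array3 n)

-- ===== PRECONDITION & SPEC =====
-- Pre_ excludes exactly the inputs where Python A raises IndexError: blocks larger than some array.
def Pre_sort_arrays (array1 : List (Option Int)) (array2 : List (Option Int)) (array3 : List (Option Int)) (blocks : Int) : Prop :=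
  blocks ≤ array1.length ∧ blocks ≤ array2.length ∧ blocks ≤ array3.length
instance (array1 : List (Option Int)) (array2 : List (Option Int)) (array3 : List (Option Int)) (blocks : Int) : Decidable (Pre_sort_arrays array1 array2 array3 blocks) := by unfold Pre_sort_arrays; infer_instance

def pvWitness_sort_arrays : List (Option Int) × List (Option Int) × List (Option Int) × Int :=
  ([some 1, none], [none, some 2], [some 3, some 4], 2)

def Spec_sort_arrays (array1 : List (Option Int)) (array2 : List (Option Int)) (array3 : List (Option Int)) (blocks : Int) (out : List (Option Int) × List (Option Int) × List (Option Int)) : Prop := out = sort_arrays_alt array1 array2 array3 blocks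
instance (array1 : List (Option Int)) (array2 : List (Option Int)) (array3 : List (Option Int)) (blocks : Int) (out : List (Option Int) × List (Option Int) × List (Option Int)) : Decidable (Spec_sort_arrays array1 array2 array3 blocks out) := by unfold Spec_sort_arrays; infer_instance

-- ===== CLAIM (what is proved, stated in full; the proofs are below) =====
def Claim_equal_sort_arrays : Prop := ∀ (array1 : List (Option Int)) (array2 : List (Option Int)) (array3 : List (Option Int)) (blocks : Int), Dom_sort_arrays array1 array2 array3 blocks → Pre_sort_arrays array1 array2 array3 blocks → Spec_sort_arrays array1 array2 array3 blocks (sort_arrays array1 array2 array3 blocks)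
-- ===== LEMMAS AND PROOFS =====

-- the triple-state foldl splits into three independent foldls
theorem pv_foldl_triple (l : List Int) (f g h : List (Option Int) → Int → List (Option Int))
    (x y z : List (Option Int)) :
    l.foldl (fun (s : List (Option Int) × List (Option Int) × List (Option Int)) i =>
      (f s.1 i, g s.2.1 i, h s.2.2 i)) (x, y, z)
    = (l.foldl f x, l.foldl g y, l.foldl h z) := by
  induction l generalizing x y z with
  | nil => rfl
  | cons a t ih => simpa using ih (f x a) (g y a) (h z a)

theorem pv_kept_len_le (arr : List (Option Int)) (n : Nat) :
    ((arr.take n).filter (fun x => x ≠ none)).length ≤ n := by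
  calc ((arr.take n).filter (fun x => x ≠ none)).length ≤ (arr.take n).length :=
        List.length_filter_le _ _
    _ ≤ n := by simpa using List.length_take_le n arr

-- A's loop over range(n) computes exactly B's partition of the length-n prefix
theorem pv_loop_eq_part (arr : List (Option Int)) (n : Nat) (hn : n ≤ arr.length) :
    (PySem.List.pyRange 0 (n : Int) 1).foldl (pvStepA arr) [] = pvPart arr n := by
  induction n with
  | zero => simp [PySem.List.pyRange_one_eq_nil, pvPart]
  | succ k ih =>
    have hk : k ≤ arr.length := Nat.le_of_succ_le hn
    have hklt : k < arr.length := hn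
    have hsplit : PySem.List.pyRange 0 ((k : Int) + 1) 1
        = PySem.List.pyRange 0 (k : Int) 1 ++ [(k : Int)] :=
      PySem.List.pyRange_one_succ_right (by positivity)
    have hx : PySem.List.pyGetD arr (k : Int) none = arr[k] := by
      rw [PySem.List.pyGetD_natCast]; simp [List.getD, hklt]
    have htake : arr.take (k + 1) = arr.take k ++ [arr[k]] := by
      rw [List.take_succ]; simp [hklt]
    have hle := pv_kept_len_le arr k
    have : ((k : Nat) : Int) + 1 = ((k + 1 : Nat) : Int) := by push_cast; ring
    rw [← this, hsplit, List.foldl_append, ih hk]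
    simp only [List.foldl_cons, List.foldl_nil, pvStepA, hx, pvPart, htake,
      List.filter_append]
    by_cases hc : arr[k] = none
    · simp only [hc, if_pos rfl]
      have : (List.filter (fun x => x ≠ none) [(none : Option Int)]) = [] := by decide
      simp only [this, List.append_nil]
      have hrep : k + 1 - (List.filter (fun x => x ≠ none) (arr.take k)).length
          = (k - (List.filter (fun x => x ≠ none) (arr.take k)).length) + 1 := by omega
      rw [hrep, List.replicate_succ]
      simp
    · have hfil : (List.filter (fun x => x ≠ none) [arr[k]]) = [arr[k]] := by
        simp [List.filter, hc]
      simp only [if_neg hc, hfil]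
      rw [List.append_assoc]
      congr 1
      congr 1
      simp only [List.length_append, List.length_singleton]
      omega

theorem pv_range_toNat (b : Int) :
    PySem.List.pyRange 0 b 1 = PySem.List.pyRange 0 ((b.toNat : Nat) : Int) 1 := by
  have h : (b - 0).toNat = (((b.toNat : Nat) : Int) - 0).toNat := by omega
  rw [PySem.List.pyRange_one, PySem.List.pyRange_one, h]

-- ===== VERDICT (by name: the statement is the Claim_ definition above) =====
theorem sort_arrays_spec : Claim_equal_sort_arrays := by
  intro a1 a2 a3 blocks _ hpre
  obtain ⟨h1, h2, h3⟩ := hpre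
  unfold Spec_sort_arrays sort_arrays sort_arrays_alt
  rw [pv_range_toNat]
  rw [pv_foldl_triple]
  rw [pv_loop_eq_part a1 _ (by omega), pv_loop_eq_part a2 _ (by omega),
      pv_loop_eq_part a3 _ (by omega)]
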